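-- pv_equiv track=rewrite | github.com/shanyoumu461/Algebra-of-Boole | src/LogicDeterime.py | Boolstr2symstr
-- ===== SOURCE A (Python) =====
-- def Boolstr2symstr(string : str) -> str:  ## 将boolean表达式转成sympy的表达式
--     def issymbol(c):
--         return c!=' ' and c!='+' and c!='(' and c!=')'
--     result = ""
--     idx = 0
--     length = len(string)
--     while(idx < length):
--         if (issymbol(string[idx])):
--             result += string[idx]
--             if idx < length -1 and (issymbol(string[idx+1]) or string[idx+1] == '('):
--                 result += "*"
--         elif string[idx] == ')':
--             result += string[idx]
--             if idx < length -1 and (issymbol(string[idx+1]) or string[idx+1] == '('):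
--                 result += "*"
--         else:
--             result += string[idx]
--         idx += 1
--     return result
-- ===== SOURCE B (Python) =====
-- def Boolstr2symstr(string : str) -> str:
--     # Stage 1: compute the cut positions i where a '*' belongs between
--     # string[i-1] and string[i] (left char can end a factor, right char can start one).
--     cuts = [i for i in range(1, len(string))
--             if string[i - 1] not in ' +(' and string[i] not in ' +)']
--     # Stage 2: slice the string at those positions and glue the pieces with '*'.
--     bounds = [0] + cuts + [len(string)]
--     return '*'.join(string[a:b] for a, b in zip(bounds, bounds[1:]))
-- ===== Notes on version B (the rewrite author's own statement) =====
-- stated objective: faster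
-- what changed: A emits character by character in a stateful index loop with lookahead and two duplicated insertion branches, growing the result by repeated string concatenation; B works in two staged passes: it first computes the list of cut positions where a multiplication sign belongs, then slices the string at those positions and glues the pieces with str.join.
import Mathlib
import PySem

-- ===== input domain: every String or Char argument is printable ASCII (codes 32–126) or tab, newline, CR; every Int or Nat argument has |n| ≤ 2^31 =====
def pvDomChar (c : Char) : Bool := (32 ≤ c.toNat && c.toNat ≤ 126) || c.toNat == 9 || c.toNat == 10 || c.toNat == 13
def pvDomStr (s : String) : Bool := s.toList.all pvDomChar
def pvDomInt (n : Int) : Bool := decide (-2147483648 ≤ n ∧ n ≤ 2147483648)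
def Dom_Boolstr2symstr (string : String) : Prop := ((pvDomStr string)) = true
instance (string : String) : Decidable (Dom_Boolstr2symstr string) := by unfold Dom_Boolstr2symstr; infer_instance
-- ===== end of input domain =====

-- B replaces A's char-by-char emitting loop (quadratic repeated concatenation) by two staged
-- passes: compute the cut positions, then slice the string there and join the pieces (faster).

-- ===== PORT A =====
def pvIssymbol (c : Char) : Bool := c != ' ' && c != '+' && c != '(' && c != ')'

-- the while loop of A: idx runs over [0, length); result is the accumulator.
-- string[idx] / string[idx+1] are ported as getD (the loop only reads them in range).
def BoolGoA (cs : List Char) (length : Nat) (idx : Nat) (result : List Char) : List Char :=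
  if idx < length then
    let c := cs.getD idx ' '
    let next := cs.getD (idx + 1) ' '
    let result :=
      if pvIssymbol c then
        let r := result ++ [c]
        if decide (idx < length - 1) && (pvIssymbol next || next == '(') then r ++ ['*'] else r
      else if c == ')' then
        let r := result ++ [c]
        if decide (idx < length - 1) && (pvIssymbol next || next == '(') then r ++ ['*'] else r
      else result ++ [c]
    BoolGoA cs length (idx + 1) result
  else result
termination_by length - idx

def Boolstr2symstr (string : String) : String :=
  String.ofList (BoolGoA string.toList string.toList.length 0 [])

-- ===== PORT B =====
def pvLeftOk (a : Char) : Bool := !(a == ' ' || a == '+' || a == '(')   -- a not in ' +('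
def pvRightOk (b : Char) : Bool := !(b == ' ' || b == '+' || b == ')')  -- b not in ' +)'

def Boolstr2symstr_alt (string : String) : String :=
  let cs := string.toList
  let n : Int := cs.length
  -- cuts = [i for i in range(1, len(string)) if …]
  let cuts := (PySem.List.pyRange 1 n 1).filter (fun i =>
      pvLeftOk (PySem.List.pyGetD cs (i - 1) ' ') && pvRightOk (PySem.List.pyGetD cs i ' '))
  -- bounds = [0] + cuts + [len(string)]
  let bounds := 0 :: cuts ++ [n]
  -- '*'.join(string[a:b] for a, b in zip(bounds, bounds[1:]))
  String.ofList (PySem.Chars.join ['*']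
    ((bounds.zip bounds.tail).map (fun p => PySem.List.slice cs (some p.1) (some p.2))))

-- ===== PRECONDITION & SPEC =====
def Spec_Boolstr2symstr (string : String) (out : String) : Prop := out = Boolstr2symstr_alt string
instance (string : String) (out : String) : Decidable (Spec_Boolstr2symstr string out) := by unfold Spec_Boolstr2symstr; infer_instance

-- ===== CLAIM (what is proved, stated in full; the proofs are below) =====
def Claim_equal_Boolstr2symstr : Prop := ∀ (string : String), Dom_Boolstr2symstr string → Spec_Boolstr2symstr string (Boolstr2symstr string)

-- ===== LEMMAS AND PROOFS =====

/-- "a '*' goes between a and b" -/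
def pvStarCond (a b : Char) : Bool := pvLeftOk a && pvRightOk b

/-- common specification of the output, by structural recursion with lookahead -/
def pairsOut : List Char → List Char
  | [] => []
  | [a] => [a]
  | a :: b :: rest => (if pvStarCond a b then [a, '*'] else [a]) ++ pairsOut (b :: rest)

lemma leftCond (a : Char) :
    (pvIssymbol a || a == ')') = pvLeftOk a := by
  by_cases h : a = ')'
  · subst h; decide
  · have hs : (a == ')') = false := beq_eq_false_iff_ne.mpr h
    simp [pvIssymbol, pvLeftOk, bne, hs]

lemma rightCond (b : Char) :
    (pvIssymbol b || b == '(') = pvRightOk b := by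
  by_cases h : b = '('
  · subst h; decide
  · by_cases h2 : b = ')'
    · subst h2; decide
    · have hs : (b == '(') = false := beq_eq_false_iff_ne.mpr h
      have hs2 : (b == ')') = false := beq_eq_false_iff_ne.mpr h2
      simp [pvIssymbol, pvRightOk, bne, hs, hs2]

lemma starCond_eq (a b : Char) :
    ((pvIssymbol a || a == ')') && (pvIssymbol b || b == '(')) = pvStarCond a b := by
  rw [leftCond, rightCond]; rfl

lemma goA_spec (cs : List Char) (idx : Nat) (result : List Char) (h : idx ≤ cs.length) :
    BoolGoA cs cs.length idx result = result ++ pairsOut (cs.drop idx) := by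
  induction hn : cs.length - idx generalizing idx result with
  | zero =>
    have : idx = cs.length := by omega
    subst this
    rw [BoolGoA]
    simp [pairsOut]
  | succ n ih =>
    have hlt : idx < cs.length := by omega
    rw [BoolGoA]
    simp only [hlt, if_true]
    rw [ih (idx + 1) _ (by omega) (by omega)]
    have hget : cs.getD idx ' ' = cs[idx] := List.getD_eq_getElem cs ' ' hlt
    rw [List.drop_eq_getElem_cons hlt]
    by_cases hlast : idx < cs.length - 1
    · -- next char exists
      have hlt2 : idx + 1 < cs.length := by omega
      have hget2 : cs.getD (idx + 1) ' ' = cs[idx + 1] := List.getD_eq_getElem cs ' ' hlt2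
      rw [List.drop_eq_getElem_cons hlt2]
      simp only [hget, hget2, hlast, decide_true, Bool.true_and, pairsOut]
      have hc := starCond_eq cs[idx] cs[idx + 1]
      by_cases hsym : pvIssymbol cs[idx] = true
      · simp only [hsym, if_true]
        by_cases hs : pvStarCond cs[idx] cs[idx + 1] = true
        · have : (pvIssymbol cs[idx + 1] || cs[idx + 1] == '(') = true := by
            rw [← hc] at hs; simp [hsym] at hs; simp [hs]
          simp [this, hs]
        · have : (pvIssymbol cs[idx + 1] || cs[idx + 1] == '(') = false := by
            by_contra hcon
            simp only [Bool.not_eq_false] at hcon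
            rw [← hc] at hs; simp [hsym, hcon] at hs
          simp [this, hs]
      · simp only [hsym]
        by_cases hpar : (cs[idx] == ')') = true
        · simp only [hpar, if_true, Bool.not_eq_true] at *
          by_cases hs : pvStarCond cs[idx] cs[idx + 1] = true
          · have : (pvIssymbol cs[idx + 1] || cs[idx + 1] == '(') = true := by
              rw [← hc] at hs
              rcases Bool.and_eq_true .. |>.mp hs with ⟨_, h2⟩
              exact h2
            simp [this, hs]
          · have : (pvIssymbol cs[idx + 1] || cs[idx + 1] == '(') = false := by
              by_contra hcon
              simp only [Bool.not_eq_false] at hcon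
              rw [← hc] at hs
              simp [hsym, hcon] at hs
            simp [this, hs]
        · -- left is ' ', '+' or '('; no star either way
          have hs : pvStarCond cs[idx] cs[idx + 1] = false := by
            rw [← hc]; simp [hsym, hpar]
          simp [hpar, hs]
    · -- last character: lookahead guard is false, pairsOut singleton
      have : idx = cs.length - 1 := by omega
      have hdrop : cs.drop (idx + 1) = [] := by
        apply List.drop_eq_nil_of_le; omega
      simp only [hget, hlast, decide_false, Bool.false_and, hdrop, pairsOut]
      by_cases hsym : pvIssymbol cs[idx] = true <;>
        by_cases hpar : (cs[idx] == ')') = true <;> simp [hsym, hpar]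

-- ---------- B side ----------

/-- the cut predicate at position j (a star between cs[j-1] and cs[j]) -/
def pvCutQ (cs : List Char) (j : Nat) : Bool :=
  pvLeftOk (cs.getD (j - 1) ' ') && pvRightOk (cs.getD j ' ')

/-- recursive form of the slice-and-glue: pieces from `a` cut at `cuts`, glued with '*' -/
def JP (cs : List Char) (a : Nat) : List Nat → List Char
  | [] => cs.drop a
  | c :: rest => (cs.drop a).take (c - a) ++ '*' :: JP cs c rest

lemma join_zip_eq_JP (cs : List Char) (a : Nat) (cuts : List Nat) :
    PySem.Chars.join ['*']
      (((a :: cuts ++ [cs.length]).zip (a :: cuts ++ [cs.length]).tail).map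
        (fun p => (cs.drop p.1).take (p.2 - p.1))) = JP cs a cuts := by
  induction cuts generalizing a with
  | nil =>
    simp only [List.cons_append, List.nil_append, List.tail_cons, List.zip_cons_cons,
      List.zip_nil_right, List.map_cons, List.map_nil, JP]
    rw [PySem.Chars.join_singleton]
    exact List.take_of_length_le (by simp)
  | cons c rest ih =>
    have hio := ih c
    obtain ⟨d, t, hrn⟩ : ∃ d t, rest ++ [cs.length] = d :: t := by
      cases h : rest ++ [cs.length] with
      | nil => simp at h
      | cons d t => exact ⟨d, t, rfl⟩
    simp only [List.cons_append, List.tail_cons, hrn, List.zip_cons_cons, List.map_cons, JP] at hio ⊢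
    rw [PySem.Chars.join_cons_cons, hio]
    simp

lemma JP_shift (cs : List Char) (a : Nat) (cuts : List Nat) (ha : a < cs.length)
    (hall : ∀ c ∈ cuts, a < c) :
    JP cs a cuts = cs.getD a ' ' :: JP cs (a + 1) cuts := by
  have hdrop : cs.drop a = cs.getD a ' ' :: cs.drop (a + 1) := by
    rw [List.getD_eq_getElem cs ' ' ha, List.drop_eq_getElem_cons ha]
  cases cuts with
  | nil => simpa [JP] using hdrop
  | cons c rest =>
    have hc : a < c := hall c (by simp)
    simp only [JP, hdrop]
    have : c - a = (c - (a + 1)) + 1 := by omega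
    rw [this, List.take_succ_cons]
    simp

lemma JP_spec (cs : List Char) (a : Nat) :
    JP cs a ((List.range' (a + 1) (cs.length - (a + 1))).filter (pvCutQ cs))
      = pairsOut (cs.drop a) := by
  induction hn : cs.length - a generalizing a with
  | zero =>
    have h1 : cs.length - (a + 1) = 0 := by omega
    have h2 : cs.drop a = [] := List.drop_eq_nil_of_le (by omega)
    simp [h1, h2, JP, pairsOut]
  | succ n ih =>
    have ha : a < cs.length := by omega
    have hdrop : cs.drop a = cs.getD a ' ' :: cs.drop (a + 1) := by
      rw [List.getD_eq_getElem cs ' ' ha, List.drop_eq_getElem_cons ha]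
    by_cases hend : a + 1 < cs.length
    · have hm : cs.length - (a + 1) = (cs.length - (a + 2)) + 1 := by omega
      rw [hm, List.range'_succ, List.filter_cons]
      have hdrop2 : cs.drop (a + 1) = cs.getD (a + 1) ' ' :: cs.drop (a + 2) := by
        rw [List.getD_eq_getElem cs ' ' hend, List.drop_eq_getElem_cons hend]
      have hq : pvCutQ cs (a + 1) = pvStarCond (cs.getD a ' ') (cs.getD (a + 1) ' ') := by
        simp [pvCutQ, pvStarCond]
      have ih' := ih (a + 1) (by omega)
      rw [show a + 1 + 1 = a + 2 by omega] at ih'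
      by_cases hcut : pvCutQ cs (a + 1) = true
      · simp only [hcut, if_true, JP]
        rw [ih']
        have ht : (cs.drop a).take (a + 1 - a) = [cs.getD a ' '] := by
          simp [hdrop]
        rw [ht, hdrop, hdrop2, pairsOut, ← hdrop2, ← hq, hcut]
        simp
      · have hcf : pvCutQ cs (a + 1) = false := by simpa using hcut
        simp only [hcf, Bool.false_eq_true, if_false]
        rw [JP_shift cs a _ ha
            (fun c hc => by
              have := List.mem_filter.mp hc
              have := List.mem_range'.mp this.1
              omega)]
        rw [ih']
        rw [hdrop, hdrop2, pairsOut, ← hdrop2, ← hq]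
        simp [hcf]
    · -- a is the last index
      have h1 : cs.length - (a + 1) = 0 := by omega
      have h2 : cs.drop (a + 1) = [] := List.drop_eq_nil_of_le (by omega)
      simp only [h1, List.range'_zero, List.filter_nil, JP, hdrop, h2, pairsOut]

lemma filter_map_cast (p : Int → Bool) (l : List Nat) :
    (l.map (Nat.cast : Nat → Int)).filter p
      = (l.filter (fun j : Nat => p (j : Int))).map (Nat.cast : Nat → Int) := by
  rw [List.filter_map]; rfl

lemma cuts_int_eq (cs : List Char) :
    (PySem.List.pyRange 1 (cs.length : Int) 1).filter (fun i =>
        pvLeftOk (PySem.List.pyGetD cs (i - 1) ' ') && pvRightOk (PySem.List.pyGetD cs i ' '))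
      = ((List.range' 1 (cs.length - 1)).filter (pvCutQ cs)).map (Nat.cast : Nat → Int) := by
  rw [PySem.List.pyRange_one, List.range'_eq_map_range]
  have hlen : ((cs.length : Int) - 1).toNat = cs.length - 1 := by omega
  rw [hlen]
  have hmap : (List.range (cs.length - 1)).map (fun k : Nat => (1 : Int) + (k : Int))
      = ((List.range (cs.length - 1)).map (fun x => 1 + x)).map (Nat.cast : Nat → Int) := by
    rw [List.map_map]; apply List.map_congr_left; intro k _
    simp only [Function.comp]; push_cast; ring
  rw [hmap, filter_map_cast]
  simp only [List.filter_map]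
  apply congrArg (List.map (Nat.cast : Nat → Int))
  apply congrArg (List.map (fun x => 1 + x))
  apply List.filter_congr
  intro k _
  simp only [Function.comp]
  have h1 : ((1 + k : Nat) : Int) - 1 = ((k : Nat) : Int) := by push_cast; ring
  rw [h1, PySem.List.pyGetD_natCast, PySem.List.pyGetD_natCast, pvCutQ]
  have h3 : 1 + k - 1 = k := by omega
  rw [h3]

lemma zip_map_slice (cs : List Char) (l : List Nat) :
    (((l.map (Nat.cast : Nat → Int)).zip (l.map (Nat.cast : Nat → Int)).tail).map
        (fun p => PySem.List.slice cs (some p.1) (some p.2)))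
      = ((l.zip l.tail).map (fun p => (cs.drop p.1).take (p.2 - p.1))) := by
  rw [← List.map_tail, List.zip_map, List.map_map]
  apply List.map_congr_left
  intro p _
  simp [PySem.List.slice_natCast]

lemma altB_eq_pairsOut (s : String) :
    Boolstr2symstr_alt s = String.ofList (pairsOut s.toList) := by
  simp only [Boolstr2symstr_alt]
  rw [cuts_int_eq s.toList]
  have hb : ((0 : Int) :: (((List.range' 1 (s.toList.length - 1)).filter (pvCutQ s.toList)).map
        (Nat.cast : Nat → Int)) ++ [(s.toList.length : Int)])
      = ((0 :: ((List.range' 1 (s.toList.length - 1)).filter (pvCutQ s.toList))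
          ++ [s.toList.length]).map (Nat.cast : Nat → Int)) := by
    simp
  rw [hb, zip_map_slice, join_zip_eq_JP]
  have := JP_spec s.toList 0
  simp only [Nat.zero_add, List.drop_zero] at this
  rw [this]

-- ===== VERDICT (by name: the statement is the Claim_ definition above) =====
theorem Boolstr2symstr_spec : Claim_equal_Boolstr2symstr := by
  intro s _
  unfold Spec_Boolstr2symstr Boolstr2symstr
  rw [goA_spec s.toList 0 [] (Nat.zero_le _), altB_eq_pairsOut s]
  simp
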